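-- pv_equiv track=rewrite | github.com/crixodia/aoc | 2023/02_cube_conundrum/main.py | solve
-- ===== SOURCE A (Python) =====
-- def is_valid_game(gt, bag):
--     return all(
--         [
--             gt.get("red", 0) <= bag["red"],
--             gt.get("green", 0) <= bag["green"],
--             gt.get("blue", 0) <= bag["blue"],
--         ]
--     )
--
-- def solve(records, bag):
--     S = 0
--     for k, v in records.items():
--         flag = True
--         for r in v:
--             if not is_valid_game(r, bag):
--                 flag = False
--         if flag:
--             S += k
--     return S
-- ===== SOURCE B (Python) =====
-- def solve(records, bag):
--     total = 0
--     for gid, reveals in records.items():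
--         if reveals:
--             need = {c: max(r.get(c, 0) for r in reveals) for c in ("red", "green", "blue")}
--             if any(need[c] > bag[c] for c in ("red", "green", "blue")):
--                 continue
--         total += gid
--     return total
-- ===== Notes on version B (the rewrite author's own statement) =====
-- stated objective: idiomatic
-- what changed: B folds each game's reveals into per-color maxima (a max over the reveal list per color) and validates the game with one comparison of those maxima against the bag, instead of A's per-reveal boolean flag maintained across an inner validity check of every reveal.
import Mathlib
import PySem

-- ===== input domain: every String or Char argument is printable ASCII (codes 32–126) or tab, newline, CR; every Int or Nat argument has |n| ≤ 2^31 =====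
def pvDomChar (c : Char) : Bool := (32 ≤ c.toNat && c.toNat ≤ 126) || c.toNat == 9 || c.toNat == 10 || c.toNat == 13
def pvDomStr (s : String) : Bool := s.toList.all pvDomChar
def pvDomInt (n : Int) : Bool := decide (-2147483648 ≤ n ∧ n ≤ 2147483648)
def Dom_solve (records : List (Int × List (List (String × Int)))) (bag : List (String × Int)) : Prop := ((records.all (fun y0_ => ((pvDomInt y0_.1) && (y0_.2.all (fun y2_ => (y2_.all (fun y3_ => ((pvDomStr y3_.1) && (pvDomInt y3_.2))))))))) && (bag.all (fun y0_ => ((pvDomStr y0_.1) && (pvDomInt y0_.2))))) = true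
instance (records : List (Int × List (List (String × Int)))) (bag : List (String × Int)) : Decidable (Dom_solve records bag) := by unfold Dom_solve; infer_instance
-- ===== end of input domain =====

-- B aggregates per-color maxima over a game's reveals and compares them once against the bag,
-- instead of A's per-reveal validity flag. Objective: idiomatic; no speed claim.

-- dict lookup (first match = unique-key dict lookup); default 0. For bag[c] (Python raises
-- KeyError when c is absent) the default is exact only under Pre_solve, which guarantees the key
-- is present whenever the lookup is reached.
def dget (d : List (String × Int)) (k : String) : Int := (d.lookup k).getD 0

-- ===== PORT A =====
def is_valid_game (gt : List (String × Int)) (bag : List (String × Int)) : Bool :=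
  [decide (dget gt "red" ≤ dget bag "red"),
   decide (dget gt "green" ≤ dget bag "green"),
   decide (dget gt "blue" ≤ dget bag "blue")].all id

def solve (records : List (Int × List (List (String × Int)))) (bag : List (String × Int)) : Int :=
  records.foldl (fun S kv =>
    let flag := kv.2.foldl (fun f r => if !(is_valid_game r bag) then false else f) true
    if flag then S + kv.1 else S) 0

-- ===== PORT B =====
-- max(r.get(c, 0) for r in reveals) for nonempty reveals = r0 :: rest
def colorMax (r0 : List (String × Int)) (rest : List (List (String × Int))) (c : String) : Int :=
  rest.foldl (fun m r => max m (dget r c)) (dget r0 c)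

def solve_alt (records : List (Int × List (List (String × Int)))) (bag : List (String × Int)) : Int :=
  records.foldl (fun total kv =>
    match kv.2 with
    | [] => total + kv.1
    | r0 :: rest =>
      if colorMax r0 rest "red" > dget bag "red"
         || colorMax r0 rest "green" > dget bag "green"
         || colorMax r0 rest "blue" > dget bag "blue"
      then total
      else total + kv.1) 0

-- ===== PRECONDITION & SPEC =====
-- Pre_ excludes exactly the inputs on which Python A raises KeyError: whenever some game has a
-- nonempty reveal list, the bag must contain all three color keys (otherwise bag[c] raises).
def Pre_solve (records : List (Int × List (List (String × Int)))) (bag : List (String × Int)) : Prop :=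
  (∀ kv ∈ records, kv.2 = []) ∨
  ((bag.lookup "red").isSome ∧ (bag.lookup "green").isSome ∧ (bag.lookup "blue").isSome)
instance (records : List (Int × List (List (String × Int)))) (bag : List (String × Int)) : Decidable (Pre_solve records bag) := by unfold Pre_solve; infer_instance

def pvWitness_solve : (List (Int × List (List (String × Int)))) × (List (String × Int)) :=
  ([(1, [[("red", 2), ("blue", 1)]]), (2, [[("blue", 9)], []]), (3, [])],
   [("red", 3), ("green", 3), ("blue", 3)])

def Spec_solve (records : List (Int × List (List (String × Int)))) (bag : List (String × Int)) (out : Int) : Prop := out = solve_alt records bag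
instance (records : List (Int × List (List (String × Int)))) (bag : List (String × Int)) (out : Int) : Decidable (Spec_solve records bag out) := by unfold Spec_solve; infer_instance

-- ===== CLAIM (what is proved, stated in full; the proofs are below) =====
def Claim_equal_solve : Prop := ∀ (records : List (Int × List (List (String × Int)))) (bag : List (String × Int)), Dom_solve records bag → Pre_solve records bag → Spec_solve records bag (solve records bag)

-- ===== LEMMAS AND PROOFS =====

-- A's inner flag loop is List.all
theorem flag_eq_all (bag : List (String × Int)) (v : List (List (String × Int))) (b : Bool) :
    v.foldl (fun f r => if !(is_valid_game r bag) then false else f) b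
      = (b && v.all (fun r => is_valid_game r bag)) := by
  induction v generalizing b with
  | nil => simp
  | cons r v ih =>
    simp only [List.foldl_cons, List.all_cons, ih]
    cases is_valid_game r bag <;> simp

-- the max fold bounded iff every element bounded
theorem foldmax_le_iff (rest : List (List (String × Int))) (a : Int) (c : String) (R : Int) :
    rest.foldl (fun m r => max m (dget r c)) a ≤ R ↔ (a ≤ R ∧ ∀ r ∈ rest, dget r c ≤ R) := by
  induction rest generalizing a with
  | nil => simp
  | cons r rest ih =>
    simp only [List.foldl_cons, ih, max_le_iff, List.forall_mem_cons]
    tauto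

theorem colorMax_le_iff (rest : List (List (String × Int))) (r0 : List (String × Int))
    (c : String) (R : Int) :
    colorMax r0 rest c ≤ R ↔ (dget r0 c ≤ R ∧ ∀ r ∈ rest, dget r c ≤ R) :=
  foldmax_le_iff rest (dget r0 c) c R

-- per-game condition equality
theorem game_eq (bag : List (String × Int)) (r0 : List (String × Int))
    (rest : List (List (String × Int))) :
    ((r0 :: rest).all (fun r => is_valid_game r bag))
      = !(colorMax r0 rest "red" > dget bag "red"
          || colorMax r0 rest "green" > dget bag "green"
          || colorMax r0 rest "blue" > dget bag "blue") := by
  rw [Bool.eq_iff_iff]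
  simp only [List.all_eq_true, Bool.not_or, Bool.and_eq_true, Bool.not_eq_true',
    decide_eq_false_iff_not, not_lt, colorMax_le_iff, is_valid_game, List.all_cons,
    List.all_nil, Bool.and_true, id, decide_eq_true_eq, forall_and]
  tauto

-- the two folds over the record list agree (any accumulator)
theorem fold_eq (bag : List (String × Int)) (recs : List (Int × List (List (String × Int))))
    (S : Int) :
    recs.foldl (fun S kv =>
        let flag := kv.2.foldl (fun f r => if !(is_valid_game r bag) then false else f) true
        if flag then S + kv.1 else S) S
      = recs.foldl (fun total kv =>
          match kv.2 with
          | [] => total + kv.1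
          | r0 :: rest =>
            if colorMax r0 rest "red" > dget bag "red"
               || colorMax r0 rest "green" > dget bag "green"
               || colorMax r0 rest "blue" > dget bag "blue"
            then total
            else total + kv.1) S := by
  induction recs generalizing S with
  | nil => rfl
  | cons kv recs ih =>
    simp only [List.foldl_cons]
    have hstep : (let flag := kv.2.foldl (fun f r => if !(is_valid_game r bag) then false else f) true
        if flag then S + kv.1 else S)
        = (match kv.2 with
          | [] => S + kv.1
          | r0 :: rest =>
            if colorMax r0 rest "red" > dget bag "red"
               || colorMax r0 rest "green" > dget bag "green"
               || colorMax r0 rest "blue" > dget bag "blue"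
            then S
            else S + kv.1) := by
      cases hv : kv.2 with
      | nil => simp
      | cons r0 rest =>
        simp only [flag_eq_all, Bool.true_and, game_eq]
        cases h : (colorMax r0 rest "red" > dget bag "red"
            || colorMax r0 rest "green" > dget bag "green"
            || colorMax r0 rest "blue" > dget bag "blue") <;> simp
    rw [hstep]
    exact ih _

-- ===== VERDICT (by name: the statement is the Claim_ definition above) =====
theorem solve_spec : Claim_equal_solve := by
  intro records bag _ _
  show solve records bag = solve_alt records bag
  unfold solve solve_alt
  exact fold_eq bag records 0
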